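-- pv_equiv track=rewrite | github.com/jianningzhuang/CS1010X-Programming_Methodology | Practical Exam/practical-template 17.py | parse_keylog
-- ===== SOURCE A (Python) =====
-- def parse_keylog(log):
--     result = ""
--     for key in log:
--         if key != "3":
--             result += key
--         else:
--             result = result[:-1]
--     return result
-- ===== SOURCE B (Python) =====
-- def parse_keylog(log):
--     out = []
--     skip = 0
--     for key in reversed(log):
--         if key == "3":
--             skip += 1
--         elif skip:
--             skip -= 1
--         else:
--             out.append(key)
--     return "".join(reversed(out))
-- ===== Notes on version B (the rewrite author's own statement) =====
-- stated objective: alternative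
-- what changed: Instead of editing an accumulated result on every key (append or truncate), B scans the log backwards once with a counter of pending '3' backspaces, skipping exactly the deleted characters so nothing is ever written and later erased.
import Mathlib
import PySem

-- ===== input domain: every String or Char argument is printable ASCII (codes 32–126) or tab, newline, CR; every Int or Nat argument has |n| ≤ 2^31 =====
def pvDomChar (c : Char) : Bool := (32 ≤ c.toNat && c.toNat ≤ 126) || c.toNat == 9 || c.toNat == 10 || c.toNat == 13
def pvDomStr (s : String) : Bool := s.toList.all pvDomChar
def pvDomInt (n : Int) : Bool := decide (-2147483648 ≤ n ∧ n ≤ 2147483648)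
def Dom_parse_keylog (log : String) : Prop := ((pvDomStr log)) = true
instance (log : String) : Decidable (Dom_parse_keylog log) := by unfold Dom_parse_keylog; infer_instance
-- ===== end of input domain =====

-- B scans the log backwards with a counter of pending '3' backspaces instead of editing the result in place (alternative algorithm, same measured cost).

-- ===== PORT A =====
-- loop: result += key, or result = result[:-1] on '3'
def parse_keylogA_loop (result : List Char) : List Char → List Char
  | [] => result
  | key :: rest =>
    if key ≠ '3' then
      parse_keylogA_loop (result ++ [key]) rest
    else
      parse_keylogA_loop (PySem.List.slice result none (some (-1))) rest

def parse_keylog (log : String) : String :=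
  String.ofList (parse_keylogA_loop [] log.toList)

-- ===== PORT B =====
-- backwards scan over the log with a counter of pending backspaces; out is in
-- processing order (reverse of the text), reversed at the end like reversed(out)
def parse_keylogB_loop (skip : Nat) : List Char → List Char
  | [] => []
  | key :: rest =>
    if key = '3' then
      parse_keylogB_loop (skip + 1) rest
    else if skip ≠ 0 then
      parse_keylogB_loop (skip - 1) rest
    else
      key :: parse_keylogB_loop skip rest

def parse_keylog_alt (log : String) : String :=
  String.ofList (parse_keylogB_loop 0 log.toList.reverse).reverse

-- ===== PRECONDITION & SPEC =====
def Spec_parse_keylog (log : String) (out : String) : Prop := out = parse_keylog_alt log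
instance (log : String) (out : String) : Decidable (Spec_parse_keylog log out) := by unfold Spec_parse_keylog; infer_instance

-- ===== CLAIM =====
def Claim_equal_parse_keylog : Prop := ∀ (log : String), Dom_parse_keylog log → Spec_parse_keylog log (parse_keylog log)

-- ===== LEMMAS AND PROOFS =====

theorem rev_dropLast (l : List Char) : l.dropLast.reverse = l.reverse.tail := by
  induction l using List.reverseRecOn with
  | nil => rfl
  | append_singleton ys y _ => simp

-- A's loop on a string extended by one last key
theorem A_snoc (l : List Char) (c : Char) (acc : List Char) :
    parse_keylogA_loop acc (l ++ [c]) =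
      if c ≠ '3' then parse_keylogA_loop acc l ++ [c]
      else (parse_keylogA_loop acc l).dropLast := by
  induction l generalizing acc with
  | nil => simp [parse_keylogA_loop, PySem.List.slice_to_neg_one]
  | cons k r ih =>
    simp only [List.cons_append, parse_keylogA_loop]
    split_ifs <;> simp_all [ih]

-- B's backward loop with `skip` pending backspaces computes A's result,
-- reversed, with the `skip` last surviving characters removed.
theorem loops_agree (r : List Char) (s : Nat) :
    parse_keylogB_loop s r = ((parse_keylogA_loop [] r.reverse).reverse).drop s := by
  induction r generalizing s with
  | nil => simp [parse_keylogB_loop, parse_keylogA_loop]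
  | cons k rest ih =>
    simp only [parse_keylogB_loop, List.reverse_cons, A_snoc]
    by_cases h : k = '3'
    · rw [if_pos h, if_neg (by simp [h]), ih, rev_dropLast, ← List.drop_one, List.drop_drop,
          Nat.add_comm]
    · rw [if_neg h, if_pos (show k ≠ '3' from h), List.reverse_append, List.reverse_singleton,
          List.singleton_append]
      by_cases hs : s = 0
      · simp [hs, ih]
      · rw [if_pos hs]
        obtain ⟨t, rfl⟩ : ∃ t, s = t + 1 := ⟨s - 1, by omega⟩
        rw [List.drop_succ_cons, ih]
        simp

-- ===== VERDICT =====
theorem parse_keylog_spec : Claim_equal_parse_keylog := by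
  intro log _
  unfold Spec_parse_keylog parse_keylog parse_keylog_alt
  rw [loops_agree]
  simp
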